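-- pv_equiv track=rewrite | github.com/stefan-mastilak/codewars-python | python_solutions/5kyu/greed_is_good.py | dice_score
-- ===== SOURCE A (Python) =====
-- def dice_score(throw: list):
--     """
--     Evaluate dice throw and return score as an integer
--     :param throw: list of five six-sided dice values (integers)
--     :return: score as integer
--     :rtype: int
--     """
--     triplets = {'111': 1000,
--                 '666': 600,
--                 '555': 500,
--                 '444': 400,
--                 '333': 300,
--                 '222': 200}
--     singles = {'1': 100,
--                '5': 50}
--     score = 0
--     throw.sort()
--     throw = ''.join(map(str, throw))
--     for k, v in triplets.items():
--         if k in throw: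
--             score += v
--             throw = throw.replace(k, '')
--             break
--     for i in throw:
--         if i in singles.keys():
--             score += singles[i]
--     return score
-- ===== SOURCE B (Python) =====
-- def dice_score(throw: list):
--     # Run-length counting re-implementation; sorts `throw` in place like the original.
--     throw.sort()
--     digits = [c for x in throw for c in str(x)]
--     runs = []
--     cur = None
--     n = 0
--     for c in digits:
--         if c == cur:
--             n += 1
--         else:
--             if cur is not None:
--                 runs.append((cur, n))
--             cur, n = c, 1
--     if cur is not None:
--         runs.append((cur, n))
--     score = 0
--     removed = None
--     for d, v in [('1', 1000), ('6', 600), ('5', 500), ('4', 400), ('3', 300), ('2', 200)]: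
--         if any(c == d and m >= 3 for c, m in runs):
--             score = v
--             removed = d
--             break
--     ones = sum(m % 3 if removed == '1' else m for c, m in runs if c == '1')
--     fives = sum(m % 3 if removed == '5' else m for c, m in runs if c == '5')
--     return score + 100 * ones + 50 * fives
-- ===== Notes on version B (the rewrite author's own statement) =====
-- stated objective: alternative
-- what changed: Replaces the sorted-string substring search and str.replace of A by a single run-length encoding of the digit sequence: the triplet face is the first of 1,6,5,4,3,2 having a run of length >= 3, and the remaining 1s and 5s are counted per run (n % 3 on the removed face), with no substring/replace operations.
import Mathlib
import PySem

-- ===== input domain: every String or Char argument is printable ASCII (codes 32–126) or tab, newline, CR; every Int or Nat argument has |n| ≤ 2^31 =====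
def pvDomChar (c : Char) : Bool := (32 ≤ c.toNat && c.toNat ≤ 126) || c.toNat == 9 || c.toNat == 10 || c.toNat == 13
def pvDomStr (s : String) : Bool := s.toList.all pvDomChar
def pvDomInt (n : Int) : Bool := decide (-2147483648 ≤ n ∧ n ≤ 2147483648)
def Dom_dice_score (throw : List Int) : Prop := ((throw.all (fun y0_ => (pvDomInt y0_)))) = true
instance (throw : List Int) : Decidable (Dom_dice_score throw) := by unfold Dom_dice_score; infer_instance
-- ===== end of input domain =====

-- B re-scores the throw by run-length counting of the digit string instead of A's substring search
-- and str.replace; equivalence is about the return value (both Pythons sort `throw` in place alike).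
-- Python str values are modelled at the PySem.Chars (List Char) level, exact per PYSEM.md.

-- ===== PORT A =====
-- the triplets dict (insertion order) with its str keys as List Char
def dsTriplets : PySem.Dict (List Char) Int :=
  ⟨[(['1','1','1'], 1000), (['6','6','6'], 600), (['5','5','5'], 500),
   (['4','4','4'], 400), (['3','3','3'], 300), (['2','2','2'], 200)]⟩

-- the singles dict; its keys are one char long and the loop tests single chars of the string
def dsSingles : PySem.Dict Char Int := ⟨[('1', 100), ('5', 50)]⟩

-- `for k, v in triplets.items(): if k in throw: score += v; throw = throw.replace(k, ''); break`
def dsLoopA : List (List Char × Int) → Int × List Char → Int × List Char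
  | [], st => st
  | (k, v) :: rest, (score, s) =>
      if PySem.Chars.isIn k s then (score + v, PySem.Chars.replace s k [])
      else dsLoopA rest (score, s)

def dice_score (throw : List Int) : Int :=
  let score : Int := 0
  let t := PySem.List.sorted throw (fun x => x) false                  -- throw.sort()
  let s := PySem.Chars.join [] (t.map PySem.Int.toChars)               -- ''.join(map(str, throw))
  let res := dsLoopA dsTriplets.items (score, s)
  -- `for i in throw: if i in singles.keys(): score += singles[i]`
  res.2.foldl (fun sc i =>
    if PySem.Dict.contains dsSingles i then sc + PySem.Dict.getD dsSingles i 0 else sc) res.1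

-- ===== PORT B =====
-- loop body building the run-length encoding (cur is None or the current char, n its count)
def bStep (st : List (Char × Nat) × Option Char × Nat) (c : Char) :
    List (Char × Nat) × Option Char × Nat :=
  match st with
  | (runs, cur, n) =>
    if cur = some c then (runs, cur, n + 1)
    else
      match cur with
      | none => (runs, some c, 1)
      | some d => (runs ++ [(d, n)], some c, 1)

-- the trailing `if cur is not None: runs.append((cur, n))`
def bFinish (st : List (Char × Nat) × Option Char × Nat) : List (Char × Nat) :=
  match st with
  | (runs, none, _) => runs
  | (runs, some d, n) => runs ++ [(d, n)]

def bFaces : List (Char × Int) :=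
  [('1', 1000), ('6', 600), ('5', 500), ('4', 400), ('3', 300), ('2', 200)]

-- `for d, v in [...]: if any(...): score = v; removed = d; break`
def bLoop : List (Char × Int) → List (Char × Nat) → Int × Option Char
  | [], _ => (0, none)
  | (d, v) :: rest, runs =>
      if runs.any (fun p => p.1 == d && decide (3 ≤ p.2)) then (v, some d)
      else bLoop rest runs

def dice_score_alt (throw : List Int) : Int :=
  let t := PySem.List.sorted throw (fun x => x) false                  -- throw.sort()
  let digits := t.flatMap (fun x => PySem.Int.toChars x)               -- [c for x in throw for c in str(x)]
  let runs := bFinish (digits.foldl bStep ([], none, 0))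
  let res := bLoop bFaces runs
  let ones : Nat := ((runs.filter (fun p => p.1 == '1')).map
      (fun p => if res.2 = some '1' then p.2 % 3 else p.2)).sum
  let fives : Nat := ((runs.filter (fun p => p.1 == '5')).map
      (fun p => if res.2 = some '5' then p.2 % 3 else p.2)).sum
  res.1 + 100 * (ones : Int) + 50 * (fives : Int)

-- ===== PRECONDITION & SPEC =====
def Spec_dice_score (throw : List Int) (out : Int) : Prop := out = dice_score_alt throw
instance (throw : List Int) (out : Int) : Decidable (Spec_dice_score throw out) := by unfold Spec_dice_score; infer_instance

-- ===== CLAIM (what is proved, stated in full; the proofs are below) =====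
def Claim_equal_dice_score : Prop := ∀ (throw : List Int), Dom_dice_score throw → Spec_dice_score throw (dice_score throw)

-- ===== LEMMAS AND PROOFS =====

def trepl (d : Char) : List Char → List Char
  | [] => []
  | [c] => [c]
  | [c1, c2] => [c1, c2]
  | c1 :: c2 :: c3 :: t =>
      if c1 = d ∧ c2 = d ∧ c3 = d then trepl d t else c1 :: trepl d (c2 :: c3 :: t)

lemma trepl_cons_ne {c d : Char} (h : c ≠ d) (t : List Char) :
    trepl d (c :: t) = c :: trepl d t := by
  match t with
  | [] => rfl
  | [c2] => rfl
  | c2 :: c3 :: t' => simp [trepl, h]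

lemma trepl_cons_d {d : Char} {t : List Char} (h : t.head? ≠ some d) :
    trepl d (d :: t) = d :: trepl d t := by
  match t with
  | [] => rfl
  | [c2] => rfl
  | c2 :: c3 :: t' => simp at h; simp [trepl, h]

lemma trepl_run_ne {c d : Char} (h : c ≠ d) (n : Nat) (t : List Char) :
    trepl d (List.replicate n c ++ t) = List.replicate n c ++ trepl d t := by
  induction n with
  | zero => simp
  | succ m ih => simpa [List.replicate_succ, trepl_cons_ne h] using ih

lemma trepl_run_d {d : Char} (n : Nat) {t : List Char} (h : t.head? ≠ some d) :
    trepl d (List.replicate n d ++ t) = List.replicate (n % 3) d ++ trepl d t := by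
  induction n using Nat.strong_induction_on with
  | _ n ih =>
    match n with
    | 0 => simp
    | 1 =>
      simpa [List.replicate_succ] using trepl_cons_d h
    | 2 =>
      match t, h with
      | [], _ => rfl
      | c :: t', h =>
        have hc : ¬ c = d := by simpa using h
        have h2 : (c :: t').head? ≠ some d := by simpa using hc
        simp [trepl, hc, trepl_cons_d h2]
    | (m+3) =>
      rw [show List.replicate (m+3) d ++ t = d :: d :: d :: (List.replicate m d ++ t) by
        simp [List.replicate_succ]]
      have : trepl d (d :: d :: d :: (List.replicate m d ++ t)) = trepl d (List.replicate m d ++ t) := by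
        simp [trepl]
      rw [this, ih m (by omega)]
      congr 2
      omega

lemma trepl_cons_not_prefix {d c : Char} {t : List Char} (h : ¬ [d, d, d] <+: (c :: t)) :
    trepl d (c :: t) = c :: trepl d t := by
  by_cases hcd : c = d
  · subst hcd
    match t with
    | [] => rfl
    | [c2] => rfl
    | c2 :: c3 :: t' =>
      have hne : ¬ (c2 = c ∧ c3 = c) := by
        intro ⟨h2, h3⟩; subst h2 h3; exact h ⟨t', rfl⟩
      rw [trepl]
      rw [if_neg (by intro ⟨_, h2, h3⟩; exact hne ⟨h2, h3⟩)]
  · exact trepl_cons_ne hcd t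

lemma go_eq_trepl (d : Char) : ∀ (fuel : Nat) (l acc : List Char), l.length ≤ fuel →
    PySem.Chars.replace.go [d, d, d] [] fuel l acc = acc.reverse ++ trepl d l := by
  intro fuel
  induction fuel with
  | zero =>
    intro l acc h
    have : l = [] := by cases l <;> simp_all
    subst this; rfl
  | succ f ih =>
    intro l acc h
    match l with
    | [] => simp [PySem.Chars.replace.go, trepl]
    | c :: t =>
      rw [PySem.Chars.replace.go]
      by_cases hp : [d, d, d].isPrefixOf (c :: t)
      · simp only [hp, if_true]
        obtain ⟨r, hr⟩ := List.isPrefixOf_iff_prefix.mp hp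
        have hc : c = d := by
          have := congrArg List.head? hr; simpa using this.symm
        subst hc
        have ht : t = c :: c :: r := by
          have := congrArg List.tail hr; simpa using this.symm
        subst ht
        have htr : trepl c (c :: c :: c :: r) = trepl c r := by simp [trepl]
        rw [show ([c, c, c] : List Char).length = 3 from rfl]
        rw [show List.drop 3 (c :: c :: c :: r) = r from rfl]
        rw [ih _ _ (by simp at h ⊢; omega), htr]
        simp
      · simp only [hp]
        rw [ih t (c :: acc) (by simp at h ⊢; omega)]
        have hnp : ¬ [d, d, d] <+: (c :: t) := fun hh => hp (List.isPrefixOf_iff_prefix.mpr hh)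
        rw [trepl_cons_not_prefix hnp]
        simp

lemma replace_eq_trepl (d : Char) (s : List Char) :
    PySem.Chars.replace s [d, d, d] [] = trepl d s := by
  rw [PySem.Chars.replace]
  simp [go_eq_trepl d s.length s [] (le_refl _)]

def flatRuns (R : List (Char × Nat)) : List Char :=
  (R.map (fun p => List.replicate p.2 p.1)).flatten

def RunsWF (R : List (Char × Nat)) : Prop :=
  (∀ p ∈ R, 1 ≤ p.2) ∧ (R.map Prod.fst).IsChain (· ≠ ·)

lemma flatRuns_cons (c : Char) (n : Nat) (R : List (Char × Nat)) :
    flatRuns ((c, n) :: R) = List.replicate n c ++ flatRuns R := by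
  simp [flatRuns]

lemma head?_flatRuns {c : Char} {n : Nat} {R : List (Char × Nat)} (hn : 1 ≤ n) :
    (flatRuns ((c, n) :: R)).head? = some c := by
  rw [flatRuns_cons]
  match n, hn with
  | (m+1), _ => simp [List.replicate_succ]

lemma runsWF_tail {p : Char × Nat} {R : List (Char × Nat)} (h : RunsWF (p :: R)) : RunsWF R := by
  obtain ⟨h1, h2⟩ := h
  exact ⟨fun q hq => h1 q (List.mem_cons_of_mem _ hq), (List.isChain_cons.mp (by simpa using h2)).2⟩

lemma head_ne_of_wf {c : Char} {n : Nat} {R : List (Char × Nat)} (h : RunsWF ((c, n) :: R)) :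
    (flatRuns R).head? ≠ some c := by
  match R with
  | [] => simp [flatRuns]
  | (c', n') :: R' =>
    have hn' : 1 ≤ n' := h.1 (c', n') (by simp)
    rw [head?_flatRuns hn']
    have : c ≠ c' := by
      have := h.2
      simp [List.isChain_cons] at this
      exact this.1
    simpa using fun hh => this hh.symm

lemma trepl_flat (d : Char) (R : List (Char × Nat)) (hwf : RunsWF R) :
    trepl d (flatRuns R) = flatRuns (R.map (fun p => if p.1 = d then (p.1, p.2 % 3) else p)) := by
  induction R with
  | nil => rfl
  | cons p R ih =>
    obtain ⟨c, n⟩ := p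
    rw [flatRuns_cons]
    by_cases hcd : c = d
    · subst hcd
      rw [trepl_run_d n (head_ne_of_wf hwf), ih (runsWF_tail hwf)]
      simp [flatRuns]
    · rw [trepl_run_ne hcd, ih (runsWF_tail hwf)]
      simp [flatRuns, hcd]

lemma count_flatRuns (R : List (Char × Nat)) (c : Char) :
    (flatRuns R).count c = ((R.filter (fun p => p.1 == c)).map (fun p => p.2)).sum := by
  induction R with
  | nil => rfl
  | cons p R ih =>
    obtain ⟨c', n⟩ := p
    rw [flatRuns_cons]
    by_cases h : c' = c
    · subst h
      simp [List.count_append, ih]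
    · simp [List.count_append, List.count_replicate, ih, h]

lemma infix_run_step {d c : Char} {rest : List Char} (n : Nat)
    (hside : c = d → rest.head? ≠ some d) :
    [d, d, d] <:+: (List.replicate n c ++ rest) → (c = d ∧ 3 ≤ n) ∨ [d, d, d] <:+: rest := by
  induction n with
  | zero => intro h; simp at h; exact Or.inr h
  | succ m ih =>
    intro h
    rw [List.replicate_succ, List.cons_append, List.infix_cons_iff] at h
    rcases h with h | h
    · -- prefix of c :: replicate m c ++ rest
      obtain ⟨r, hr⟩ := h
      have hc : c = d := by
        have := congrArg List.head? hr; simpa using this.symm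
      subst hc
      -- need 3 ≤ m + 1, i.e. m ≥ 2
      left
      refine ⟨rfl, ?_⟩
      by_contra hm
      have hm2 : m = 0 ∨ m = 1 := by omega
      have hs := hside rfl
      rcases hm2 with rfl | rfl
      · simp at hr
        rw [← hr] at hs
        simp at hs
      · simp [List.replicate_succ] at hr
        rw [← hr] at hs
        simp at hs
    · exact (ih h).imp (fun ⟨h1, h2⟩ => ⟨h1, by omega⟩) id

lemma infix_iff (d : Char) (R : List (Char × Nat)) (hwf : RunsWF R) :
    ([d, d, d] <:+: flatRuns R) ↔ ∃ p ∈ R, p.1 = d ∧ 3 ≤ p.2 := by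
  induction R with
  | nil => simp [flatRuns]
  | cons p R ih =>
    obtain ⟨c, n⟩ := p
    rw [flatRuns_cons]
    constructor
    · intro h
      have hside : c = d → (flatRuns R).head? ≠ some d := by
        intro hcd; subst hcd; exact head_ne_of_wf hwf
      rcases infix_run_step n hside h with ⟨h1, h2⟩ | h
      · exact ⟨(c, n), by simp, h1, h2⟩
      · obtain ⟨q, hq, hq2⟩ := (ih (runsWF_tail hwf)).mp h
        exact ⟨q, by simp [hq], hq2⟩
    · rintro ⟨q, hq, hq1, hq2⟩
      rcases List.mem_cons.mp hq with rfl | hq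
      · -- triple inside the head run
        simp only at hq1 hq2
        subst hq1
        have hrep : List.replicate n c = List.replicate 3 c ++ List.replicate (n - 3) c := by
          rw [← List.replicate_add]; congr 1; omega
        have hpre : [c, c, c] <+: List.replicate n c ++ flatRuns R := by
          rw [hrep]
          exact ⟨List.replicate (n - 3) c ++ flatRuns R, by simp⟩
        exact hpre.isInfix
      · exact ((ih (runsWF_tail hwf)).mpr ⟨q, hq, hq1, hq2⟩).trans
          (List.suffix_append _ _).isInfix
def bRemoved : Option Char → List (Char × Nat) → List (Char × Nat)
  | none, R => R
  | some d, R => R.map (fun p => if p.1 = d then (p.1, p.2 % 3) else p)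

def GoodSt : List (Char × Nat) × Option Char × Nat → Prop
  | (runs, none, _) => runs = []
  | (runs, some d, n) => 1 ≤ n ∧ (∀ p ∈ runs, 1 ≤ p.2) ∧ ((runs.map Prod.fst) ++ [d]).IsChain (· ≠ ·)

lemma foldl_singles (l : List Char) (sc : Int) :
    l.foldl (fun sc i =>
      if PySem.Dict.contains dsSingles i then sc + PySem.Dict.getD dsSingles i 0 else sc) sc
    = sc + 100 * (l.count '1' : Int) + 50 * (l.count '5' : Int) := by
  induction l generalizing sc with
  | nil => simp
  | cons c t ih =>
    rw [List.foldl_cons, ih]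
    by_cases h1 : c = '1'
    · subst h1
      simp [dsSingles, PySem.Dict.contains, PySem.Dict.getD, PySem.Dict.get?]
      ring
    · by_cases h5 : c = '5'
      · subst h5
        simp [dsSingles, PySem.Dict.contains, PySem.Dict.getD, PySem.Dict.get?]
        ring
      · simp [dsSingles, PySem.Dict.contains, PySem.Dict.getD, PySem.Dict.get?, h1, h5]
        rintro (h | h)
        · exact absurd h.symm h1
        · exact absurd h.symm h5

lemma runsWF_of_good {st} (h : GoodSt st) : RunsWF (bFinish st) := by
  obtain ⟨runs, cur, n⟩ := st
  match cur with
  | none => simp_all [GoodSt, bFinish, RunsWF]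
  | some d =>
    obtain ⟨h1, h2, h3⟩ := h
    refine ⟨?_, ?_⟩
    · intro p hp
      rcases List.mem_append.mp hp with hp | hp
      · exact h2 p hp
      · simp at hp; simp [hp, h1]
    · simpa [bFinish] using h3

lemma goodSt_step {st} (h : GoodSt st) (c : Char) :
    GoodSt (bStep st c) ∧ flatRuns (bFinish (bStep st c)) = flatRuns (bFinish st) ++ [c] := by
  obtain ⟨runs, cur, n⟩ := st
  match cur with
  | none =>
    have hr : runs = [] := h
    subst hr
    simp [bStep, bFinish, GoodSt, flatRuns]
  | some d =>
    obtain ⟨h1, h2, h3⟩ := h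
    by_cases hc : d = c
    · subst hc
      have hb : bStep (runs, some d, n) d = (runs, some d, n + 1) := by simp [bStep]
      rw [hb]
      refine ⟨⟨by omega, h2, h3⟩, ?_⟩
      simp [bFinish, flatRuns, List.replicate_succ']
    · have hne : ¬ ((some d : Option Char) = some c) := by simp [hc]
      have hb : bStep (runs, some d, n) c = (runs ++ [(d, n)], some c, 1) := by
        simp [bStep, hne]
      rw [hb]
      constructor
      · refine ⟨le_refl 1, ?_, ?_⟩
        · intro p hp
          rcases List.mem_append.mp hp with hp | hp
          · exact h2 p hp
          · simp at hp; simp [hp, h1]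
        · rw [List.map_append]
          rw [List.isChain_append]
          refine ⟨h3, by simp, ?_⟩
          intro x hx y hy
          simp at hx hy
          subst hy
          subst hx
          exact hc
      · simp [bFinish, flatRuns]

lemma foldl_bStep (digits : List Char) : ∀ st, GoodSt st →
    GoodSt (digits.foldl bStep st) ∧
    flatRuns (bFinish (digits.foldl bStep st)) = flatRuns (bFinish st) ++ digits := by
  induction digits with
  | nil => intro st h; simpa using h
  | cons c t ih =>
    intro st h
    obtain ⟨hg, hf⟩ := goodSt_step h c
    obtain ⟨hg2, hf2⟩ := ih (bStep st c) hg
    exact ⟨hg2, by rw [List.foldl_cons] at *; rw [hf2, hf]; simp⟩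

lemma loops_agree (faces : List (Char × Int)) (R : List (Char × Nat)) (hwf : RunsWF R)
    (score : Int) :
    dsLoopA (faces.map (fun p => ([p.1, p.1, p.1], p.2))) (score, flatRuns R)
      = (score + (bLoop faces R).1, flatRuns (bRemoved (bLoop faces R).2 R)) := by
  induction faces generalizing score with
  | nil => simp [dsLoopA, bLoop, bRemoved]
  | cons p faces ih =>
    obtain ⟨d, v⟩ := p
    rw [List.map_cons]
    rw [show dsLoopA ((([d, d, d], v)) :: faces.map (fun p => ([p.1, p.1, p.1], p.2))) (score, flatRuns R)
        = if PySem.Chars.isIn [d, d, d] (flatRuns R)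
          then (score + v, PySem.Chars.replace (flatRuns R) [d, d, d] [])
          else dsLoopA (faces.map (fun p => ([p.1, p.1, p.1], p.2))) (score, flatRuns R) from rfl]
    have hcond : PySem.Chars.isIn [d, d, d] (flatRuns R) = R.any (fun p => p.1 == d && decide (3 ≤ p.2)) := by
      rcases hb : R.any (fun p => p.1 == d && decide (3 ≤ p.2)) with _ | _
      · rw [PySem.Chars.isIn_eq_false_iff _ _, infix_iff d R hwf]
        simp only [List.any_eq_false, Bool.and_eq_true, beq_iff_eq, decide_eq_true_eq,
          not_and] at hb
        rintro ⟨⟨a, b⟩, hp, h1, h2⟩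
        simp only at h1
        subst h1
        exact absurd h2 (hb (a, b) hp rfl)
      · refine (PySem.Chars.isIn_iff_infix _ _).mpr ((infix_iff d R hwf).mpr ?_)
        simp only [List.any_eq_true, Bool.and_eq_true, beq_iff_eq, decide_eq_true_eq] at hb
        obtain ⟨p, hp, h1, h2⟩ := hb
        exact ⟨p, hp, h1, h2⟩
    by_cases hb : R.any (fun p => p.1 == d && decide (3 ≤ p.2))
    · rw [hcond, if_pos hb]
      rw [show bLoop ((d, v) :: faces) R = (v, some d) from by simp [bLoop, hb]]
      rw [replace_eq_trepl, trepl_flat d R hwf]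
      rfl
    · rw [hcond, if_neg (by simpa using hb)]
      rw [show bLoop ((d, v) :: faces) R = bLoop faces R from by simp [bLoop, hb]]
      exact ih score

lemma count_bRemoved (R : List (Char × Nat)) (rem : Option Char) (c : Char) :
    ((flatRuns (bRemoved rem R)).count c : Nat)
      = ((R.filter (fun p => p.1 == c)).map
          (fun p => if rem = some c then p.2 % 3 else p.2)).sum := by
  match rem with
  | none => simp [bRemoved, count_flatRuns]
  | some d =>
    rw [bRemoved, count_flatRuns]
    have hf : (R.map (fun p => if p.1 = d then (p.1, p.2 % 3) else p)).filter (fun p => p.1 == c)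
        = (R.filter (fun p => p.1 == c)).map (fun p => if p.1 = d then (p.1, p.2 % 3) else p) := by
      rw [List.filter_map]
      congr 1
      apply List.filter_congr
      intro p _
      by_cases h : p.1 = d <;> simp [h]
    rw [hf, List.map_map]
    refine congrArg List.sum (List.map_congr_left ?_)
    intro p hp
    have hpc : p.1 = c := by simpa using (List.mem_filter.mp hp).2
    by_cases hcd : c = d
    · subst hcd; simp [hpc]
    · have h2 : ¬ p.1 = d := by rw [hpc]; exact hcd
      have h3 : ¬ ((some d : Option Char) = some c) := by simp; exact fun h => hcd h.symm
      simp [h2, h3]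

lemma join_nil_flatten (L : List (List Char)) : PySem.Chars.join [] L = L.flatten := by
  induction L with
  | nil => rfl
  | cons h t ih =>
    simp [PySem.Chars.join, List.intercalate] at *
    cases t <;> simp_all

-- ===== VERDICT (by name: the statement is the Claim_ definition above) =====
theorem dice_score_spec : Claim_equal_dice_score := by
  intro throw _
  unfold Spec_dice_score
  rw [dice_score, dice_score_alt]
  have hjoin : ∀ (t : List Int), PySem.Chars.join [] (t.map PySem.Int.toChars)
      = t.flatMap (fun x => PySem.Int.toChars x) := by
    intro t; rw [join_nil_flatten]; simp [List.flatMap_def]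
  rw [hjoin]
  set t := PySem.List.sorted throw (fun x => x) false with ht
  set digits := t.flatMap (fun x => PySem.Int.toChars x) with hd
  have hgood0 : GoodSt (([] : List (Char × Nat)), (none : Option Char), 0) := rfl
  obtain ⟨hgood, hflat⟩ := foldl_bStep digits _ hgood0
  set R := bFinish (digits.foldl bStep ([], none, 0)) with hR
  have hflatR : flatRuns R = digits := by simpa [bFinish, flatRuns] using hflat
  have hwf : RunsWF R := runsWF_of_good hgood
  have htrip : dsTriplets.items = bFaces.map (fun p => ([p.1, p.1, p.1], p.2)) := by rfl
  rw [htrip, ← hflatR, loops_agree bFaces R hwf 0, foldl_singles]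
  have h1 := count_bRemoved R (bLoop bFaces R).2 '1'
  have h5 := count_bRemoved R (bLoop bFaces R).2 '5'
  rw [h1, h5]
  push_cast
  ring
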